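-- pv_equiv track=rewrite | github.com/3D-Printing-for-Microfluidics/pymfcad | pathing/pathing.py | simplify_cardinal_path
-- ===== SOURCE A (Python) =====
-- def simplify_cardinal_path(points):
--     # Remove any duplicate entries
--     tmp = [points[0]]
--     for point in points[1:]:
--         if point != tmp[-1]:
--             tmp.append(point)
--     points = tmp
--
--     # Keep only cardinal points
--     if len(points) <= 2:
--         return points[:]
--
--     simplified = [points[0], points[1]]
--     dx, dy, dz = tuple(ai - bi for ai, bi in zip(simplified[-1], simplified[-2]))
--
--     for i, p in enumerate(points):
--         if i < 2:
--             continue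
--
--         ndx, ndy, ndz = tuple(ai - bi for ai, bi in zip(p, simplified[-1]))
--         if (ndx, ndy, ndz) != (dx, dy, dz):
--             # Direction changed, keep current point
--             simplified.append(p)
--             dx, dy, dz = ndx, ndy, ndz
--         else:
--             simplified.pop()
--             simplified.append(p)
--     return simplified
-- ===== SOURCE B (Python) =====
-- def simplify_cardinal_path(points):
--     # Pass 1: drop adjacent duplicates (comprehension over consecutive pairs).
--     ps = [points[0]] + [cur for prev, cur in zip(points, points[1:]) if cur != prev]
--
--     if len(ps) <= 2:
--         return ps[:]
--
--     # Pass 2: keep an interior point only when its two adjacent step vectors differ.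
--     out = [ps[0]]
--     for prev, cur, nxt in zip(ps, ps[1:], ps[2:]):
--         (px, py, pz), (cx, cy, cz), (nx, ny, nz) = prev, cur, nxt
--         if (cx - px, cy - py, cz - pz) != (nx - cx, ny - cy, nz - cz):
--             out.append(cur)
--     out.append(ps[-1])
--     return out
-- ===== Notes on version B (the rewrite author's own statement) =====
-- stated objective: simpler
-- what changed: A's stateful second pass that tracks a running direction vector and mutates the result with pop()/append() is replaced by a stateless comprehension-style scan over consecutive triples zip(ps, ps[1:], ps[2:]) that keeps an interior point exactly when its two adjacent step vectors differ (first pass becomes a pairwise-zip comprehension).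
import Mathlib
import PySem

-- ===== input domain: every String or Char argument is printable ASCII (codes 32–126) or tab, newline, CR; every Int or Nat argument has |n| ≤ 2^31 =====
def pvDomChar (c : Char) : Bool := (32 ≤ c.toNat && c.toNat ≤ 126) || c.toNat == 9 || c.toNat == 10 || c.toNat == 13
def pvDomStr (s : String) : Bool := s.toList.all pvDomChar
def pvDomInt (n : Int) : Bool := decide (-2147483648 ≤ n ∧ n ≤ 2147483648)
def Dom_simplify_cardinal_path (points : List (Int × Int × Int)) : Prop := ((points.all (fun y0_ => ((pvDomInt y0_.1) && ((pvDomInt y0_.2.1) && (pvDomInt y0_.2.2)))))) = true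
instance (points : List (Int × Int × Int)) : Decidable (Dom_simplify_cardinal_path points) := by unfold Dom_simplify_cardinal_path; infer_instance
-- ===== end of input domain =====

-- B replaces A's stateful pop()/append() direction loop by a stateless scan comparing each
-- interior point's two adjacent step vectors (zip of consecutive triples); objective: simpler.

-- ===== PORT A =====
-- 'tuple(ai - bi for ai, bi in zip(a, b))' on 3-tuples
def pvSub3 (a b : Int × Int × Int) : Int × Int × Int :=
  (a.1 - b.1, a.2.1 - b.2.1, a.2.2 - b.2.2)
-- one iteration of A's dedup loop
def pvDedupStep (tmp : List (Int × Int × Int)) (p : Int × Int × Int) : List (Int × Int × Int) :=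
  if p ≠ tmp.getLast! then tmp ++ [p] else tmp
-- one iteration of A's main loop over enumerate(points); state = (simplified, (dx,dy,dz))
def pvStepA (sd : List (Int × Int × Int) × (Int × Int × Int)) (ip : Int × (Int × Int × Int)) :
    List (Int × Int × Int) × (Int × Int × Int) :=
  if ip.1 < 2 then sd
  else
    let nd := pvSub3 ip.2 sd.1.getLast!
    if nd ≠ sd.2 then (sd.1 ++ [ip.2], nd)
    else (sd.1.dropLast ++ [ip.2], sd.2)
def simplify_cardinal_path (points : List (Int × Int × Int)) : List (Int × Int × Int) :=
  match points with
  | [] => []  -- Python raises IndexError on points[0]; excluded by Pre_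
  | h :: t =>
    let ps := t.foldl pvDedupStep [h]   -- tmp = [points[0]]; for point in points[1:]: ...
    if ps.length ≤ 2 then ps
    else
      match ps with
      | p0 :: p1 :: _ =>
        ((PySem.List.enumerate ps 0).foldl pvStepA ([p0, p1], pvSub3 p1 p0)).1
      | _ => []  -- unreachable: ps.length > 2
-- ===== PORT B =====
-- B's step vector cur - prev, by explicit coordinate unpacking as in Source B
def pvVec (prev cur : Int × Int × Int) : Int × Int × Int :=
  match prev, cur with
  | (px, py, pz), (cx, cy, cz) => (cx - px, cy - py, cz - pz)
-- ps = [points[0]] + [cur for prev, cur in zip(points, points[1:]) if cur != prev];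
-- then keep ps[0], each interior cur of zip(ps, ps[1:], ps[2:]) whose adjacent steps differ, and ps[-1]
def simplify_cardinal_path_alt (points : List (Int × Int × Int)) : List (Int × Int × Int) :=
  let ps := points.take 1 ++
    ((points.zip (points.drop 1)).filterMap (fun pc => if pc.2 ≠ pc.1 then some pc.2 else none))
  if ps.length ≤ 2 then ps
  else
    ps.take 1 ++
      (((ps.zip (ps.drop 1)).zip (ps.drop 2)).filterMap
        (fun t => if pvVec t.1.1 t.1.2 ≠ pvVec t.1.2 t.2 then some t.1.2 else none)) ++
      [ps.getLast!]


-- ===== PRECONDITION & SPEC =====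
-- Python A raises IndexError on the empty list (points[0]); only that input is excluded.
def Pre_simplify_cardinal_path (points : List (Int × Int × Int)) : Prop := points ≠ []
instance (points : List (Int × Int × Int)) : Decidable (Pre_simplify_cardinal_path points) := by unfold Pre_simplify_cardinal_path; infer_instance

def pvWitness_simplify_cardinal_path : (List (Int × Int × Int)) :=
  [(0, 0, 0), (1, 0, 0), (2, 0, 0), (2, 1, 0)]

def Spec_simplify_cardinal_path (points : List (Int × Int × Int)) (out : List (Int × Int × Int)) : Prop := out = simplify_cardinal_path_alt points
instance (points : List (Int × Int × Int)) (out : List (Int × Int × Int)) : Decidable (Spec_simplify_cardinal_path points out) := by unfold Spec_simplify_cardinal_path; infer_instance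

-- ===== CLAIM (what is proved, stated in full; the proofs are below) =====
def Claim_equal_simplify_cardinal_path : Prop := ∀ (points : List (Int × Int × Int)), Dom_simplify_cardinal_path points → Pre_simplify_cardinal_path points → Spec_simplify_cardinal_path points (simplify_cardinal_path points)

-- ===== LEMMAS AND PROOFS =====
theorem pv_getLast!_concat (k : List (Int × Int × Int)) (c : Int × Int × Int) :
    (k ++ [c]).getLast! = c := by
  simp [List.getLast!_eq_getLast?_getD]

def gDedup (c : Int × Int × Int) : List (Int × Int × Int) → List (Int × Int × Int)
  | [] => []
  | p :: rs => if p ≠ c then p :: gDedup p rs else gDedup c rs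

theorem foldl_pvDedupStep (t : List (Int × Int × Int)) :
    ∀ (k : List (Int × Int × Int)) (c : Int × Int × Int),
      t.foldl pvDedupStep (k ++ [c]) = k ++ c :: gDedup c t := by
  induction t with
  | nil => intro k c; simp [gDedup]
  | cons p rs ih =>
    intro k c
    simp only [List.foldl_cons, pvDedupStep, pv_getLast!_concat, gDedup]
    by_cases h : p = c
    · simp [h, ih k c]
    · have := ih (k ++ [c]) p
      simp [h] at this ⊢
      simpa using this

theorem gDedup_eq_zipFilter (t : List (Int × Int × Int)) :
    ∀ c, gDedup c t =
      ((c :: t).zip t).filterMap (fun pc => if pc.2 ≠ pc.1 then some pc.2 else none) := by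
  induction t with
  | nil => intro c; simp [gDedup]
  | cons p rs ih =>
    intro c
    simp only [gDedup, List.zip_cons_cons, List.filterMap_cons]
    by_cases h : p = c
    · subst h; simpa using ih p
    · simp [h, ih p]

def gMain (c d : Int × Int × Int) : List (Int × Int × Int) → List (Int × Int × Int)
  | [] => [c]
  | p :: rs => if pvSub3 p c ≠ d then c :: gMain p (pvSub3 p c) rs else gMain p d rs

def pvStepA' (sd : List (Int × Int × Int) × (Int × Int × Int)) (p : Int × Int × Int) :
    List (Int × Int × Int) × (Int × Int × Int) :=
  let nd := pvSub3 p sd.1.getLast!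
  if nd ≠ sd.2 then (sd.1 ++ [p], nd)
  else (sd.1.dropLast ++ [p], sd.2)

theorem foldl_enumerate_ge_two (rest : List (Int × Int × Int)) :
    ∀ (n : Int), 2 ≤ n → ∀ sd,
      (PySem.List.enumerate rest n).foldl pvStepA sd = rest.foldl pvStepA' sd := by
  induction rest with
  | nil => intro n _ sd; simp [PySem.List.enumerate_nil]
  | cons p rs ih =>
    intro n hn sd
    rw [PySem.List.enumerate_cons]
    simp only [List.foldl_cons]
    rw [show pvStepA sd (n, p) = pvStepA' sd p by
      simp [pvStepA, pvStepA', show ¬ (n < 2) by omega]]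
    exact ih (n + 1) (by omega) _

theorem foldl_pvStepA' (rest : List (Int × Int × Int)) :
    ∀ (k : List (Int × Int × Int)) (c d : Int × Int × Int),
      (rest.foldl pvStepA' (k ++ [c], d)).1 = k ++ gMain c d rest := by
  induction rest with
  | nil => intro k c d; simp [gMain]
  | cons p rs ih =>
    intro k c d
    simp only [List.foldl_cons, pvStepA', pv_getLast!_concat, List.dropLast_concat, gMain]
    by_cases h : pvSub3 p c = d
    · have := ih k p d
      simp [h, this]
    · have := ih (k ++ [c]) p (pvSub3 p c)
      simp [h] at this ⊢
      simpa using this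

theorem pvVec_eq_pvSub3 (a b : Int × Int × Int) : pvVec a b = pvSub3 b a := by
  rcases a with ⟨ax, ay, az⟩; rcases b with ⟨bx, by_, bz⟩; rfl

theorem gMain_eq_zipFilter (rest : List (Int × Int × Int)) :
    ∀ (prev c : Int × Int × Int),
      gMain c (pvSub3 c prev) rest =
        (((prev :: c :: rest).zip (c :: rest)).zip rest).filterMap
          (fun t => if pvVec t.1.1 t.1.2 ≠ pvVec t.1.2 t.2 then some t.1.2 else none) ++
        [rest.getLastD c] := by
  induction rest with
  | nil => intro prev c; simp [gMain]
  | cons p rs ih =>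
    intro prev c
    simp only [gMain, List.zip_cons_cons, List.filterMap_cons, pvVec_eq_pvSub3,
      List.getLastD_cons]
    by_cases h : pvSub3 p c = pvSub3 c prev
    · have ihp := ih c p
      rw [show pvSub3 p c = pvSub3 c prev from h] at ihp ⊢
      simp [ihp, pvVec_eq_pvSub3]
    · have ihp := ih c p
      simp [h, Ne.symm h, ihp, pvVec_eq_pvSub3]

theorem pv_getLast!_cons (h : Int × Int × Int) (t : List (Int × Int × Int)) :
    (h :: t).getLast! = t.getLastD h := by
  simp [List.getLast!_eq_getLast?_getD, List.getLast?_cons, List.getLastD_eq_getLast?]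

theorem portA_cons (h : Int × Int × Int) (t : List (Int × Int × Int)) :
    simplify_cardinal_path (h :: t) =
      match gDedup h t with
      | [] => [h]
      | [p1] => [h, p1]
      | p1 :: p2 :: r => h :: gMain p1 (pvSub3 p1 h) (p2 :: r) := by
  have hded : t.foldl pvDedupStep [h] = h :: gDedup h t := by
    simpa using foldl_pvDedupStep t [] h
  show (let ps := t.foldl pvDedupStep [h];
        if ps.length ≤ 2 then ps
        else match ps with
          | p0 :: p1 :: _ =>
            ((PySem.List.enumerate ps 0).foldl pvStepA ([p0, p1], pvSub3 p1 p0)).1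
          | _ => []) = _
  rw [hded]
  match hg : gDedup h t with
  | [] => simp
  | [p1] => simp
  | p1 :: p2 :: r =>
    rw [if_neg (by simp)]
    show ((PySem.List.enumerate (h :: p1 :: p2 :: r) 0).foldl pvStepA
        ([h, p1], pvSub3 p1 h)).1 = _
    rw [PySem.List.enumerate_cons, PySem.List.enumerate_cons]
    simp only [List.foldl_cons]
    rw [show pvStepA ([h, p1], pvSub3 p1 h) (0, h) = ([h, p1], pvSub3 p1 h) by
      simp [pvStepA]]
    rw [show pvStepA ([h, p1], pvSub3 p1 h) (0 + 1, p1) = ([h, p1], pvSub3 p1 h) by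
      simp [pvStepA]]
    rw [foldl_enumerate_ge_two (p2 :: r) (0 + 1 + 1) (by norm_num)]
    exact foldl_pvStepA' (p2 :: r) [h] p1 (pvSub3 p1 h)

theorem portB_cons (h : Int × Int × Int) (t : List (Int × Int × Int)) :
    simplify_cardinal_path_alt (h :: t) =
      match gDedup h t with
      | [] => [h]
      | [p1] => [h, p1]
      | p1 :: p2 :: r => h :: gMain p1 (pvSub3 p1 h) (p2 :: r) := by
  have hB : (h :: t).take 1 ++
      (((h :: t).zip ((h :: t).drop 1)).filterMap
        (fun pc => if pc.2 ≠ pc.1 then some pc.2 else none)) = h :: gDedup h t := by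
    simp [gDedup_eq_zipFilter t h]
  show (let ps := (h :: t).take 1 ++
      (((h :: t).zip ((h :: t).drop 1)).filterMap
        (fun pc => if pc.2 ≠ pc.1 then some pc.2 else none));
    if ps.length ≤ 2 then ps
    else
      ps.take 1 ++
        (((ps.zip (ps.drop 1)).zip (ps.drop 2)).filterMap
          (fun t => if pvVec t.1.1 t.1.2 ≠ pvVec t.1.2 t.2 then some t.1.2 else none)) ++
        [ps.getLast!]) = _
  rw [hB]
  match hg : gDedup h t with
  | [] => simp
  | [p1] => simp
  | p1 :: p2 :: r =>
    rw [if_neg (by simp)]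
    show _ = h :: gMain p1 (pvSub3 p1 h) (p2 :: r)
    rw [gMain_eq_zipFilter (p2 :: r) h p1]
    simp only [pv_getLast!_cons, List.getLastD_eq_getLast?]
    cases hl : (p2 :: r).getLast? with
    | none => simp at hl
    | some x => simp [hl]

-- ===== VERDICT (by name: the statement is the Claim_ definition above) =====
theorem simplify_cardinal_path_spec : Claim_equal_simplify_cardinal_path := by
  intro points _ hpre
  unfold Pre_simplify_cardinal_path at hpre
  unfold Spec_simplify_cardinal_path
  match points with
  | [] => exact absurd rfl hpre
  | h :: t => rw [portA_cons, portB_cons]
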